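-- pv_equiv track=rewrite | github.com/Daena23/snake_game | game_initiation.py | define_walls_coordinates
-- ===== SOURCE A (Python) =====
-- def define_walls_coordinates(field_size):
--     # border
--     border = [0, field_size - 1]
--     walls_coordinates = []
--     for i in range(field_size):
--         for j in range(field_size):
--             if i in border and [i, j] not in walls_coordinates:  # TODO edit
--                 walls_coordinates.append([i, j])
--             if j in border and [i, j] not in walls_coordinates:
--                 walls_coordinates.append([i, j])
--     return walls_coordinates
-- ===== SOURCE B (Python) =====
-- def define_walls_coordinates(field_size):
--     # boundary traversal: top row, then side cells of middle rows, then bottom row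
--     walls = [[0, j] for j in range(field_size)]
--     for i in range(1, field_size - 1):
--         walls.append([i, 0])
--         walls.append([i, field_size - 1])
--     if field_size > 1:
--         walls.extend([field_size - 1, j] for j in range(field_size))
--     return walls
-- ===== Notes on version B (the rewrite author's own statement) =====
-- stated objective: faster
-- what changed: B emits the border by direct boundary traversal (top row, left/right cells of each middle row, bottom row) instead of scanning every cell of the n*n grid with a linear membership test on the growing result list.
import Mathlib
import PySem

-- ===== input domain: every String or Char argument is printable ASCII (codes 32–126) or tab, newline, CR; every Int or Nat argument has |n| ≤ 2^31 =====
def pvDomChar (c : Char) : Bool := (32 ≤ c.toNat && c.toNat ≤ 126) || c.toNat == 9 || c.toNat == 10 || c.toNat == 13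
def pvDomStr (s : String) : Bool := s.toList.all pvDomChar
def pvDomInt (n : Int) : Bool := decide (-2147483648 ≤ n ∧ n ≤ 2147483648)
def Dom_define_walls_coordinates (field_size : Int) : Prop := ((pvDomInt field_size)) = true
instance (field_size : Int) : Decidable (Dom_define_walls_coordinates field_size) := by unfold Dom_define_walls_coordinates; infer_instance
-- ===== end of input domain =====

-- B replaces A's full-grid scan with membership tests by a direct O(n) boundary traversal (faster; return value only, no mutation observable).

-- ===== PORT A =====
-- one step of A's inner loop body (the two 'if … append' statements), for fixed field_size and i
def dwcInner (field_size i : Int) (walls_coordinates : List (List Int)) (j : Int) : List (List Int) :=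
  let border : List Int := [0, field_size - 1]
  let walls1 := if i ∈ border ∧ [i, j] ∉ walls_coordinates then walls_coordinates ++ [[i, j]] else walls_coordinates
  if j ∈ border ∧ [i, j] ∉ walls1 then walls1 ++ [[i, j]] else walls1

def define_walls_coordinates (field_size : Int) : List (List Int) :=
  (PySem.List.pyRange 0 field_size 1).foldl
    (fun walls_coordinates i =>
      (PySem.List.pyRange 0 field_size 1).foldl (dwcInner field_size i) walls_coordinates)
    []

-- ===== PORT B =====
def define_walls_coordinates_alt (field_size : Int) : List (List Int) :=
  let walls := (PySem.List.pyRange 0 field_size 1).map (fun j => [0, j])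
  let walls := (PySem.List.pyRange 1 (field_size - 1) 1).foldl
      (fun w i => w ++ [[i, 0]] ++ [[i, field_size - 1]]) walls
  if field_size > 1 then
    walls ++ (PySem.List.pyRange 0 field_size 1).map (fun j => [field_size - 1, j])
  else walls

-- ===== PRECONDITION & SPEC =====
def Spec_define_walls_coordinates (field_size : Int) (out : List (List Int)) : Prop := out = define_walls_coordinates_alt field_size
instance (field_size : Int) (out : List (List Int)) : Decidable (Spec_define_walls_coordinates field_size out) := by unfold Spec_define_walls_coordinates; infer_instance

-- ===== CLAIM (what is proved, stated in full; the proofs are below) =====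
def Claim_equal_define_walls_coordinates : Prop := ∀ (field_size : Int), Dom_define_walls_coordinates field_size → Spec_define_walls_coordinates field_size (define_walls_coordinates field_size)

-- ===== LEMMAS AND PROOFS =====

-- a fold whose step never changes the accumulator is the accumulator
lemma foldl_fixed {α β : Type} (f : β → α → β) (l : List α) :
    ∀ acc, (∀ b x, x ∈ l → f b x = b) → l.foldl f acc = acc := by
  induction l with
  | nil => intro acc _; rfl
  | cons x xs ih =>
    intro acc h
    simp only [List.foldl_cons, h acc x (by simp)]
    exact ih acc (fun b y hy => h b y (by simp [hy]))

-- inner step on a border row: appends [i,j] exactly once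
lemma dwcInner_border {n i j : Int} {acc : List (List Int)}
    (hi : i = 0 ∨ i = n - 1) (hj : [i, j] ∉ acc) :
    dwcInner n i acc j = acc ++ [[i, j]] := by
  simp [dwcInner, hi, hj]

-- inner step on a middle row, border column
lemma dwcInner_mid_border {n i j : Int} {acc : List (List Int)}
    (hi0 : i ≠ 0) (hi1 : i ≠ n - 1) (hj : j = 0 ∨ j = n - 1) (hm : [i, j] ∉ acc) :
    dwcInner n i acc j = acc ++ [[i, j]] := by
  simp [dwcInner, hi0, hi1, hj, hm]

-- inner step on an interior cell: no-op
lemma dwcInner_interior {n i j : Int} {acc : List (List Int)}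
    (hi0 : i ≠ 0) (hi1 : i ≠ n - 1) (hj0 : j ≠ 0) (hj1 : j ≠ n - 1) :
    dwcInner n i acc j = acc := by
  simp [dwcInner, hi0, hi1, hj0, hj1]

-- inner loop over a border row emits the whole row
lemma rowBorder (n i : Int) (hi : i = 0 ∨ i = n - 1) :
    ∀ (k : Nat) (a b : Int), (b - a).toNat = k →
    ∀ acc : List (List Int), (∀ j', a ≤ j' → [i, j'] ∉ acc) →
    (PySem.List.pyRange a b 1).foldl (dwcInner n i) acc
      = acc ++ (PySem.List.pyRange a b 1).map (fun j => [i, j]) := by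
  intro k
  induction k with
  | zero =>
    intro a b hk acc _
    rw [PySem.List.pyRange_one_eq_nil (show b ≤ a by omega)]
    simp
  | succ m ih =>
    intro a b hk acc hacc
    have hab : a < b := by omega
    rw [PySem.List.pyRange_one_cons hab]
    simp only [List.foldl_cons, List.map_cons]
    rw [dwcInner_border hi (hacc a le_rfl)]
    rw [ih (a + 1) b (by omega) (acc ++ [[i, a]])
      (by intro j' hj'; simp; exact ⟨hacc j' (by omega), by omega⟩)]
    simp

-- inner loop over a middle row emits exactly the two side cells
lemma rowMid (n i : Int) (hn : 2 ≤ n) (hi0 : i ≠ 0) (hi1 : i ≠ n - 1)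
    (acc : List (List Int)) (h0 : [i, 0] ∉ acc) (h1 : [i, n - 1] ∉ acc) :
    (PySem.List.pyRange 0 n 1).foldl (dwcInner n i) acc = acc ++ [[i, 0], [i, n - 1]] := by
  have hsplit : PySem.List.pyRange 0 n 1
      = [(0 : Int)] ++ PySem.List.pyRange 1 (n - 1) 1 ++ [n - 1] := by
    rw [PySem.List.pyRange_one_cons (by omega)]
    simp only [zero_add]
    rw [PySem.List.pyRange_one_append 1 (n - 1) n (by omega) (by omega)]
    rw [PySem.List.pyRange_one_cons (show n - 1 < n by omega)]
    rw [show n - 1 + 1 = n by omega, PySem.List.pyRange_one_eq_nil (le_refl n)]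
    simp
  rw [hsplit]
  rw [List.foldl_append, List.foldl_append]
  have s1 : List.foldl (dwcInner n i) acc [(0 : Int)] = acc ++ [[i, 0]] := by
    simp only [List.foldl_cons, List.foldl_nil]
    exact dwcInner_mid_border hi0 hi1 (Or.inl rfl) h0
  rw [s1]
  have s2 : List.foldl (dwcInner n i) (acc ++ [[i, 0]]) (PySem.List.pyRange 1 (n - 1) 1)
      = acc ++ [[i, 0]] := by
    apply foldl_fixed
    intro b x hx
    have hx' := (PySem.List.mem_pyRange_one).1 hx
    have hx0 : x ≠ 0 := by omega
    have hxn : x ≠ n - 1 := by omega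
    exact dwcInner_interior hi0 hi1 hx0 hxn
  rw [s2]
  simp only [List.foldl_cons, List.foldl_nil]
  rw [dwcInner_mid_border hi0 hi1 (Or.inr rfl) (by
    simp only [List.mem_append, List.mem_cons, List.not_mem_nil, or_false, not_or]
    exact ⟨h1, by intro h; simp only [List.cons.injEq] at h; omega⟩)]
  simp

-- the middle part of B's output
def midRows (n a : Int) : List (List Int) :=
  (PySem.List.pyRange a (n - 1) 1).flatMap (fun i => [[i, 0], [i, n - 1]])

lemma mem_midRows {n a : Int} {x : List Int} (hx : x ∈ midRows n a) :
    ∃ i j : Int, x = [i, j] ∧ a ≤ i ∧ i < n - 1 := by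
  simp only [midRows, List.mem_flatMap] at hx
  obtain ⟨i, hi, hxi⟩ := hx
  have hi' := (PySem.List.mem_pyRange_one).1 hi
  simp only [List.mem_cons, List.not_mem_nil, or_false] at hxi
  rcases hxi with h | h
  · exact ⟨i, 0, h, hi'.1, hi'.2⟩
  · exact ⟨i, n - 1, h, hi'.1, hi'.2⟩

-- A's outer loop over the middle rows
lemma midFold (n : Int) (hn : 2 ≤ n) :
    ∀ (k : Nat) (a : Int), (n - 1 - a).toNat = k → 1 ≤ a →
    ∀ acc : List (List Int), (∀ i j : Int, a ≤ i → [i, j] ∉ acc) →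
    (PySem.List.pyRange a (n - 1) 1).foldl
      (fun w i => (PySem.List.pyRange 0 n 1).foldl (dwcInner n i) w) acc
      = acc ++ midRows n a := by
  intro k
  induction k with
  | zero =>
    intro a hk _ acc _
    rw [show midRows n a = [] by
      simp [midRows, PySem.List.pyRange_one_eq_nil (show n - 1 ≤ a by omega)]]
    rw [PySem.List.pyRange_one_eq_nil (show n - 1 ≤ a by omega)]
    simp
  | succ m ih =>
    intro a hk ha acc hacc
    have hab : a < n - 1 := by omega
    rw [PySem.List.pyRange_one_cons hab]
    simp only [List.foldl_cons]
    rw [rowMid n a hn (by omega) (by omega) acc (hacc a 0 le_rfl) (hacc a (n - 1) le_rfl)]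
    rw [ih (a + 1) (by omega) (by omega) (acc ++ [[a, 0], [a, n - 1]])
      (by
        intro i j hi
        simp only [List.mem_append, List.mem_cons, not_or]
        refine ⟨hacc i j (by omega), ?_, ?_, by simp⟩
        · intro h; injection h with h1 _; omega
        · intro h; injection h with h1 _; omega)]
    rw [show midRows n a = [[a, 0], [a, n - 1]] ++ midRows n (a + 1) by
      simp [midRows, PySem.List.pyRange_one_cons hab]]
    simp

-- B's middle fold as a flatMap
lemma bMid (n : Int) (w : List (List Int)) :
    (PySem.List.pyRange 1 (n - 1) 1).foldl
      (fun w i => w ++ [[i, 0]] ++ [[i, n - 1]]) w = w ++ midRows n 1 := by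
  rw [PySem.List.foldl_congr_mem (PySem.List.pyRange 1 (n - 1) 1)
    (fun w i => w ++ [[i, 0]] ++ [[i, n - 1]]) (fun w i => w ++ [[i, 0], [i, n - 1]]) w
    (by intro acc x _; simp)]
  exact PySem.List.foldl_append_eq_flatMap _ _ _

-- main equivalence for n ≥ 2
lemma main_big (n : Int) (hn : 2 ≤ n) :
    define_walls_coordinates n = define_walls_coordinates_alt n := by
  have hsplit : PySem.List.pyRange 0 n 1
      = [(0 : Int)] ++ PySem.List.pyRange 1 (n - 1) 1 ++ [n - 1] := by
    rw [PySem.List.pyRange_one_cons (by omega)]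
    simp only [zero_add]
    rw [PySem.List.pyRange_one_append 1 (n - 1) n (by omega) (by omega)]
    rw [PySem.List.pyRange_one_cons (show n - 1 < n by omega)]
    rw [show n - 1 + 1 = n by omega, PySem.List.pyRange_one_eq_nil (le_refl n)]
    simp
  unfold define_walls_coordinates define_walls_coordinates_alt
  rw [congrArg (List.foldl
    (fun w i => List.foldl (dwcInner n i) w (PySem.List.pyRange 0 n 1)) ([] : List (List Int))) hsplit]
  rw [List.foldl_append, List.foldl_append]
  -- top row
  simp only [List.foldl_cons, List.foldl_nil]
  rw [rowBorder n 0 (Or.inl rfl) (n - 0).toNat 0 n rfl [] (by simp)]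
  simp only [List.nil_append]
  set top := (PySem.List.pyRange 0 n 1).map (fun j => [(0 : Int), j]) with htop
  have hmemtop : ∀ x ∈ top, ∃ j : Int, x = [0, j] := by
    intro x hx; simp [htop] at hx; obtain ⟨j, _, hj⟩ := hx; exact ⟨j, hj.symm⟩
  -- middle rows
  rw [midFold n hn (n - 1 - 1).toNat 1 rfl le_rfl top
    (by
      intro i j hi hmem
      obtain ⟨j', hj'⟩ := hmemtop _ hmem
      injection hj' with h1 _; omega)]
  -- bottom row
  rw [rowBorder n (n - 1) (Or.inr rfl) (n - 0).toNat 0 n rfl (top ++ midRows n 1)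
    (by
      intro j' _ hmem
      rcases List.mem_append.1 hmem with h | h
      · obtain ⟨j'', hj''⟩ := hmemtop _ h
        injection hj'' with h1 _; omega
      · obtain ⟨i, j'', hx, hi1, hi2⟩ := mem_midRows h
        injection hx with h1 _; omega)]
  rw [bMid n top]
  simp [show (1 : Int) < n by omega]

-- ===== VERDICT (by name: the statement is the Claim_ definition above) =====
theorem define_walls_coordinates_spec : Claim_equal_define_walls_coordinates := by
  intro n _
  unfold Spec_define_walls_coordinates
  by_cases h2 : 2 ≤ n
  · exact main_big n h2
  · by_cases h1 : n = 1
    · subst h1; decide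
    · unfold define_walls_coordinates define_walls_coordinates_alt
      rw [PySem.List.pyRange_one_eq_nil (show n ≤ 0 by omega),
        PySem.List.pyRange_one_eq_nil (show n - 1 ≤ 1 by omega)]
      simp [show ¬ (1 : Int) < n by omega]
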